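-- pv_equiv track=rewrite | github.com/HelenaAlvesPrado/CAETE_JP | model_inputs/ada_love.py | month_index
-- ===== SOURCE A (Python) =====
-- mont = ['jan','feb','mar','apr','may','jun',
--         'jul','aug','sep','okt','nov','dec']
--
-- def month_index(years):
--
--     ind = list(range(int(years * 12)))
--
--     mont1 = mont * years
--
--     x =  list(zip(mont1, ind))
--     jan = [num for mes, num in x if mes == 'jan']
--     feb = [num for mes, num in x if mes == 'feb']
--     mar = [num for mes, num in x if mes == 'mar']
--     apr = [num for mes, num in x if mes == 'apr']
--     may = [num for mes, num in x if mes == 'may']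
--     jun = [num for mes, num in x if mes == 'jun']
--     jul = [num for mes, num in x if mes == 'jul']
--     aug = [num for mes, num in x if mes == 'aug']
--     sep = [num for mes, num in x if mes == 'sep']
--     okt = [num for mes, num in x if mes == 'okt']
--     nov = [num for mes, num in x if mes == 'nov']
--     dec = [num for mes, num in x if mes == 'dec']
--
--     month_dict = {'jan':jan, 'feb':feb, 'mar':mar, 'apr':apr, 'may':may, 'jun':jun,
--                  'jul':jul, 'aug':aug, 'sep':sep, 'okt':okt, 'nov':nov, 'dec':dec}
--     return month_dict
-- ===== SOURCE B (Python) =====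
-- mont = ['jan','feb','mar','apr','may','jun',
--         'jul','aug','sep','okt','nov','dec']
--
-- def month_index(years):
--     month_dict = {m: [] for m in mont}
--     for i in range(12 * years):
--         month_dict[mont[i % 12]].append(i)
--     return month_dict
-- ===== Notes on version B (the rewrite author's own statement) =====
-- stated objective: faster
-- what changed: Instead of materialising a label/index zip of the whole span and running twelve separate filtering comprehensions over it, B pre-keys the dict with the month names and fills it in a single pass, dispatching each index to its month by taking the index modulo the month count.
import Mathlib
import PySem

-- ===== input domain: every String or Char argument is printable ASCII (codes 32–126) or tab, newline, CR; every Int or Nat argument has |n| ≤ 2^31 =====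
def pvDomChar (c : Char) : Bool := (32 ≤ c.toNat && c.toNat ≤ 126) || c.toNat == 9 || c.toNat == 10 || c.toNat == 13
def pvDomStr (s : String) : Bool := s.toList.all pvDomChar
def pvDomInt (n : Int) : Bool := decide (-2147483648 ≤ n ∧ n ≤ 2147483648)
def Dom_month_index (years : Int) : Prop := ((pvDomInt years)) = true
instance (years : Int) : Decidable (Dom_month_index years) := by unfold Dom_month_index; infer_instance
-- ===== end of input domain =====

-- B replaces A's label/index zip plus twelve separate filtering comprehensions by one pre-keyed
-- dict filled in a single pass dispatching index i to month i % 12 (measured faster in a timing run).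

def pvMont : List String := ["jan","feb","mar","apr","may","jun","jul","aug","sep","okt","nov","dec"]

-- ===== PORT A =====
def month_index (years : Int) : List (String × List Int) :=
  let ind := PySem.List.pyRange 0 (years * 12) 1      -- list(range(int(years * 12))); int() is identity on an int
  let mont1 := List.flatten (List.replicate years.toNat pvMont)   -- mont * years (empty for years ≤ 0, as in Python)
  let x := List.zip mont1 ind
  let jan := (x.filter (fun p => p.1 == "jan")).map (fun p => p.2)
  let feb := (x.filter (fun p => p.1 == "feb")).map (fun p => p.2)
  let mar := (x.filter (fun p => p.1 == "mar")).map (fun p => p.2)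
  let apr := (x.filter (fun p => p.1 == "apr")).map (fun p => p.2)
  let may := (x.filter (fun p => p.1 == "may")).map (fun p => p.2)
  let jun := (x.filter (fun p => p.1 == "jun")).map (fun p => p.2)
  let jul := (x.filter (fun p => p.1 == "jul")).map (fun p => p.2)
  let aug := (x.filter (fun p => p.1 == "aug")).map (fun p => p.2)
  let sep := (x.filter (fun p => p.1 == "sep")).map (fun p => p.2)
  let okt := (x.filter (fun p => p.1 == "okt")).map (fun p => p.2)
  let nov := (x.filter (fun p => p.1 == "nov")).map (fun p => p.2)
  let dec := (x.filter (fun p => p.1 == "dec")).map (fun p => p.2)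
  [("jan", jan), ("feb", feb), ("mar", mar), ("apr", apr), ("may", may), ("jun", jun),
   ("jul", jul), ("aug", aug), ("sep", sep), ("okt", okt), ("nov", nov), ("dec", dec)]

-- ===== PORT B =====
def month_index_alt (years : Int) : List (String × List Int) :=
  let d0 : PySem.Dict String (List Int) :=
    pvMont.foldl (fun d m => d.insert m ([] : List Int)) PySem.Dict.empty   -- {m: [] for m in mont}
  let d := (PySem.List.pyRange 0 (12 * years) 1).foldl
    (fun d i => d.modify (PySem.List.pyGetD pvMont (PySem.Int.mod i 12) "") [] (fun l => l ++ [i])) d0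
    -- mont[i % 12]: 0 ≤ i % 12 < 12 = len(mont) always, so pyGetD's default is never used (exact);
    -- month_dict[...].append(i) is Dict.modify appending i
  d.items

-- ===== PRECONDITION & SPEC =====
def Spec_month_index (years : Int) (out : List (String × List Int)) : Prop := out = month_index_alt years
instance (years : Int) (out : List (String × List Int)) : Decidable (Spec_month_index years out) := by unfold Spec_month_index; infer_instance

-- ===== CLAIM (what is proved, stated in full; the proofs are below) =====
def Claim_equal_month_index : Prop := ∀ (years : Int), Dom_month_index years → Spec_month_index years (month_index years)

-- ===== LEMMAS AND PROOFS =====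

-- the month label Python's mont[i % 12] picks for index i
def keyOf (i : Int) : String := PySem.List.pyGetD pvMont (PySem.Int.mod i 12) ""

-- B's initial dict {m: [] for m in mont}
def pvD0 : PySem.Dict String (List Int) :=
  pvMont.foldl (fun d m => d.insert m ([] : List Int)) PySem.Dict.empty

set_option maxHeartbeats 2000000 in
theorem pvD0_eq : pvD0 = PySem.Dict.mk [("jan",[]),("feb",[]),("mar",[]),("apr",[]),("may",[]),("jun",[]),
    ("jul",[]),("aug",[]),("sep",[]),("okt",[]),("nov",[]),("dec",[])] := by rfl

theorem mk_getD_nil (c : String) (L : List (String × List Int)) (h : ∀ p ∈ L, p.2 = []) :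
    (PySem.Dict.mk L).getD c [] = [] := by
  induction L with
  | nil => rfl
  | cons p rest ih =>
    rw [PySem.Dict.getD_eq_get?_getD, PySem.Dict.get?_mk_cons]
    split
    · simp [h p (by simp)]
    · rw [← PySem.Dict.getD_eq_get?_getD]
      exact ih (fun q hq => h q (by simp [hq]))

theorem pvD0_getD (c : String) : pvD0.getD c [] = [] := by
  rw [pvD0_eq]
  exact mk_getD_nil c _ (by intro p hp; fin_cases hp <;> rfl)

-- updating a set with elements it already has changes nothing
theorem setUpdate_of_mem {α : Type} [DecidableEq α] (l s : List α) (h : ∀ x ∈ l, x ∈ s) :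
    PySem.Set.update s l = s := by
  induction l generalizing s with
  | nil => rfl
  | cons x l ih =>
    have hmem : x ∈ s := h x (by simp)
    have hx : PySem.Set.add s x = s := by
      simp [PySem.Set.add, PySem.Set.contains, hmem]
    simp only [PySem.Set.update, List.foldl_cons] at *
    rw [hx]; exact ih s (fun y hy => h y (by simp [hy]))

theorem keyOf_mem (i : Int) : keyOf i ∈ pvMont := by
  have h1 : (0:Int) ≤ PySem.Int.mod i 12 := PySem.Int.mod_nonneg _ (by norm_num)
  have h2 : PySem.Int.mod i 12 < 12 := PySem.Int.mod_lt _ (by norm_num)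
  unfold keyOf
  rw [PySem.List.pyGetD_of_nonneg _ _ h1]
  rw [List.getD_eq_getElem _ _ (by simp [pvMont]; omega)]
  exact List.getElem_mem _

-- one year's block of the zip, starting at offset 12*n
theorem zip_block (n : Nat) :
    List.zip pvMont (PySem.List.pyRange (12*(n:Int)) (12*(n:Int)+12) 1)
      = (PySem.List.pyRange (12*(n:Int)) (12*(n:Int)+12) 1).map (fun i => (keyOf i, i)) := by
  have h12 : ((12*(n:Int)+12) - 12*(n:Int)).toNat = 12 := by omega
  rw [PySem.List.pyRange_one, h12]
  have he : ∀ k : Int, 0 ≤ k → k < 12 → (12*(n:Int) + k) % 12 = k := by intro k h1 h2; omega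
  simp [List.range_succ, keyOf, he, pvMont, PySem.List.pyGetD]

-- A's zip(mont * n, range(12 * n)) pairs each index i with the label mont[i % 12]
theorem zip_all (n : Nat) :
    List.zip (List.flatten (List.replicate n pvMont)) (PySem.List.pyRange 0 (12*(n:Int)) 1)
      = (PySem.List.pyRange 0 (12*(n:Int)) 1).map (fun i => (keyOf i, i)) := by
  induction n with
  | zero => simp
  | succ n ih =>
    have hsplit : PySem.List.pyRange 0 (12*((n+1:Nat):Int)) 1
        = PySem.List.pyRange 0 (12*(n:Int)) 1 ++ PySem.List.pyRange (12*(n:Int)) (12*(n:Int)+12) 1 := by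
      have hcast : (12*((n+1:Nat):Int)) = 12*(n:Int)+12 := by push_cast; ring
      rw [hcast, PySem.List.pyRange_one_append 0 (12*(n:Int)) (12*(n:Int)+12) (by positivity) (by omega)]
    rw [List.replicate_succ', List.flatten_append, hsplit,
        List.zip_append (by simp [pvMont, PySem.List.length_pyRange_one]; omega), List.map_append, ih]
    simp [zip_block n]

-- B's per-month lists: the dict entry at c collects exactly the range indices whose label is c
theorem B_dict_getD (years : Int) (c : String) :
    ((PySem.List.pyRange 0 (12*years) 1).foldl
        (fun d i => d.modify (keyOf i) [] (fun l => l ++ [i])) pvD0).getD c []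
      = (((PySem.List.pyRange 0 (12*years) 1).map (fun i => (keyOf i, i))).filter
          (fun p => p.1 == c)).map (fun p => p.2) := by
  have hfm : ((PySem.List.pyRange 0 (12*years) 1).map (fun i => (keyOf i, i))).foldl
      (fun (d : PySem.Dict String (List Int)) (p : String × Int) => d.modify p.1 [] (fun l => l ++ [p.2])) pvD0
      = (PySem.List.pyRange 0 (12*years) 1).foldl
        (fun d i => d.modify (keyOf i) [] (fun l => l ++ [i])) pvD0 := by rw [List.foldl_map]
  rw [← hfm, PySem.Dict.getD_foldl_modify_append, pvD0_getD, List.nil_append]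

theorem B_dict_keys (years : Int) :
    ((PySem.List.pyRange 0 (12*years) 1).foldl
        (fun d i => d.modify (keyOf i) [] (fun l => l ++ [i])) pvD0).keys = pvMont := by
  rw [PySem.Dict.keys_foldl_modify_key]
  have hd0 : pvD0.keys = pvMont := by rw [pvD0_eq]; rfl
  rw [hd0, setUpdate_of_mem]
  intro x hx
  simp only [List.mem_map] at hx
  obtain ⟨i, _, rfl⟩ := hx
  exact keyOf_mem i

-- B's result in order: one pair per month name, jan … dec
theorem B_dict_items (years : Int) :
    ((PySem.List.pyRange 0 (12*years) 1).foldl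
        (fun d i => d.modify (keyOf i) [] (fun l => l ++ [i])) pvD0).items
      = pvMont.map (fun k =>
          (k, ((PySem.List.pyRange 0 (12*years) 1).foldl
                (fun d i => d.modify (keyOf i) [] (fun l => l ++ [i])) pvD0).getD k [])) := by
  have hnd : ((PySem.List.pyRange 0 (12*years) 1).foldl
        (fun d i => d.modify (keyOf i) [] (fun l => l ++ [i])) pvD0).keys.Nodup := by
    apply PySem.Dict.nodup_keys_foldl_modify_key
    rw [pvD0_eq]; decide
  rw [PySem.Dict.items_eq_map_keys _ hnd [], B_dict_keys]

theorem months_agree (years : Int) : month_index years = month_index_alt years := by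
  have halt : month_index_alt years
      = ((PySem.List.pyRange 0 (12*years) 1).foldl
          (fun d i => d.modify (keyOf i) [] (fun l => l ++ [i])) pvD0).items := rfl
  rw [halt, B_dict_items]
  simp only [B_dict_getD]
  by_cases hy : 0 ≤ years
  · obtain ⟨n, rfl⟩ : ∃ n : Nat, years = (n:Int) := ⟨years.toNat, (Int.toNat_of_nonneg hy).symm⟩
    show month_index (n:Int) = _
    simp only [month_index]
    have hr : ((n:Int)*12) = 12*(n:Int) := by ring
    rw [hr, Int.toNat_natCast, zip_all n]
    simp [pvMont]
  · have h1 : PySem.List.pyRange 0 (years*12) 1 = [] := PySem.List.pyRange_one_eq_nil (by omega)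
    have h2 : PySem.List.pyRange 0 (12*years) 1 = [] := PySem.List.pyRange_one_eq_nil (by omega)
    have h3 : years.toNat = 0 := by omega
    simp [month_index, h1, h2, h3, pvMont]

-- ===== VERDICT (by name: the statement is the Claim_ definition above) =====
theorem month_index_spec : Claim_equal_month_index := by
  intro years _
  unfold Spec_month_index
  exact months_agree years
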